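-- pv_equiv track=rewrite | github.com/icebeartellsnolies/leetcode | site_code/codeforces/soldier_banana_546a.py | borrowed
-- ===== SOURCE A (Python) =====
-- def borrowed(cost,money,quantity):
--     sum=0
--     i=1
--     while i<=quantity:
--         sum=sum+(cost*i)
--         i=i+1
--     to_borrow=0
--     if sum>money:
--         to_borrow=sum-money
--     return to_borrow
-- ===== SOURCE B (Python) =====
-- def borrowed(cost, money, quantity):
--     n = quantity if quantity > 0 else 0
--     total = cost * n * (n + 1) // 2
--     shortfall = total - money
--     return shortfall if shortfall > 0 else 0
-- ===== Notes on version B (the rewrite author's own statement) =====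
-- stated objective: faster
-- what changed: Replaces the O(quantity) summing loop with the arithmetic-series closed form cost*n*(n+1)//2, then clamps the shortfall at 0.
import Mathlib
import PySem

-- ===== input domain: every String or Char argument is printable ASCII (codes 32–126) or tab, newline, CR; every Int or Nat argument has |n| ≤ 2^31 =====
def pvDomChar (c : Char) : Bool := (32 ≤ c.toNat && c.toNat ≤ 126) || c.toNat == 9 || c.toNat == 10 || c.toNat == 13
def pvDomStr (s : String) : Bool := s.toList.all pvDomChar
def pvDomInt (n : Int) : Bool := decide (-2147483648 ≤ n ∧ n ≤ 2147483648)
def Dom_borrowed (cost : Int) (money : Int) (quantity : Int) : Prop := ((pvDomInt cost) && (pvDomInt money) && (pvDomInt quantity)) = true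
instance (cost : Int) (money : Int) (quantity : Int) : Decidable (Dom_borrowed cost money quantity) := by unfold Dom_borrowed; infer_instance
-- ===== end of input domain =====

-- B replaces A's O(quantity) summing loop with the O(1) arithmetic-series closed form (objective: faster).

-- ===== PORT A =====
-- A's while loop runs i = 1, 2, …, quantity accumulating sum += cost*i; ported as a fold over that range.
def borrowed (cost : Int) (money : Int) (quantity : Int) : Int :=
  let sum := (PySem.List.pyRange 1 (quantity + 1) 1).foldl (fun s i => s + cost * i) 0
  if sum > money then sum - money else 0

-- ===== PORT B =====
def borrowed_alt (cost : Int) (money : Int) (quantity : Int) : Int :=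
  let n : Int := if quantity > 0 then quantity else 0
  let total := PySem.Int.floordiv (cost * n * (n + 1)) 2
  let shortfall := total - money
  if shortfall > 0 then shortfall else 0

-- ===== PRECONDITION & SPEC =====
def Spec_borrowed (cost : Int) (money : Int) (quantity : Int) (out : Int) : Prop := out = borrowed_alt cost money quantity
instance (cost : Int) (money : Int) (quantity : Int) (out : Int) : Decidable (Spec_borrowed cost money quantity out) := by unfold Spec_borrowed; infer_instance

-- ===== CLAIM (what is proved, stated in full; the proofs are below) =====
def Claim_equal_borrowed : Prop := ∀ (cost : Int) (money : Int) (quantity : Int), Dom_borrowed cost money quantity → Spec_borrowed cost money quantity (borrowed cost money quantity)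

-- ===== LEMMAS AND PROOFS =====

-- the loop's sum over 1..n (n : Nat) has the closed form cost*n*(n+1)/2, via a generalized-accumulator induction
theorem pv_sum_loop (cost s : Int) (n : Nat) :
    (PySem.List.pyRange 1 ((n : Int) + 1) 1).foldl (fun s i => s + cost * i) s
      = s + cost * n * (n + 1) / 2 := by
  induction n generalizing s with
  | zero => simp [PySem.List.pyRange]
  | succ k ih =>
      rw [show ((k + 1 : Nat) : Int) + 1 = ((k : Int) + 1) + 1 by push_cast; ring,
        PySem.List.pyRange_one_succ_right (by omega)]
      rw [List.foldl_append, ih]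
      simp only [List.foldl_cons, List.foldl_nil]
      push_cast
      have h2 : (2 : Int) ∣ cost * k * (k + 1) := by
        rcases Int.even_or_odd (k : Int) with ⟨m, hm⟩ | ⟨m, hm⟩
        · exact ⟨cost * m * ((k : Int) + 1), by rw [hm]; ring⟩
        · exact ⟨cost * (k : Int) * (m + 1), by rw [hm]; ring⟩
      have h2' : (2 : Int) ∣ cost * ((k : Int) + 1) * (((k : Int) + 1) + 1) := by
        rcases Int.even_or_odd (k : Int) with ⟨m, hm⟩ | ⟨m, hm⟩
        · exact ⟨cost * (m + 1) * ((k : Int) + 1 + 1) - cost * (m + 1) * 1, by rw [hm]; ring⟩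
        · exact ⟨cost * (m + 1) * ((k : Int) + 1 + 1), by rw [hm]; ring⟩
      obtain ⟨a, ha⟩ := h2
      obtain ⟨b, hb⟩ := h2'
      rw [ha, hb, Int.mul_ediv_cancel_left _ (by norm_num), Int.mul_ediv_cancel_left _ (by norm_num)]
      have key : cost * ((k : Int) + 1) * (((k : Int) + 1) + 1) - cost * k * (k + 1)
          = 2 * (cost * ((k : Int) + 1)) := by ring
      omega

-- ===== VERDICT (by name: the statement is the Claim_ definition above) =====
theorem borrowed_spec : Claim_equal_borrowed := by
  intro cost money quantity _
  unfold Spec_borrowed borrowed borrowed_alt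
  simp only [gt_iff_lt]
  rw [PySem.Int.floordiv_eq_ediv_of_pos (by norm_num : (0:Int) < 2)]
  by_cases hq : quantity > 0
  · rw [show quantity + 1 = ((quantity.toNat : Nat) : Int) + 1 by omega, pv_sum_loop]
    rw [if_pos hq, show ((quantity.toNat : Nat) : Int) = quantity by omega]
    omega
  · have hr : PySem.List.pyRange 1 (quantity + 1) 1 = [] := by
      simp [PySem.List.pyRange]; omega
    rw [hr, if_neg hq]
    simp only [List.foldl_nil]
    omega
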